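-- pv_equiv track=rewrite | github.com/hyeonmin504/algorithm-Python | programmers/level1/page3.py | solution3_13
-- ===== SOURCE A (Python) =====
-- def solution3_13(answers):
--     std1=[1, 2, 3, 4, 5]
--     std2=[2, 1, 2, 3, 2, 4, 2, 5]
--     std3=[3, 3, 1, 1, 2, 2, 4, 4, 5, 5]
--     p1,p2,p3 = 0,0,0
--     for num, answer in enumerate(answers):
--         if std1[num%5] == answer:
--             p1 += 1
--         if std2[num%8] == answer:
--             p2 += 1
--         if std3[num%10] == answer:
--             p3 += 1
--     answer = [p1,p2,p3]
--     return [index+1 for index, point in enumerate(answer) if point == max(answer)]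
-- ===== SOURCE B (Python) =====
-- def solution3_13(answers):
--     # Histogram approach: one pass bucketing answers by (index mod 40, value),
--     # then each pattern is scored by 40 dict lookups (lcm(5,8,10)=40), no per-element comparison.
--     freq = {}
--     for i, a in enumerate(answers):
--         key = (i % 40, a)
--         freq[key] = freq.get(key, 0) + 1
--     patterns = [[1, 2, 3, 4, 5],
--                 [2, 1, 2, 3, 2, 4, 2, 5],
--                 [3, 3, 1, 1, 2, 2, 4, 4, 5, 5]]
--     scores = [sum(freq.get((r, pat[r % len(pat)]), 0) for r in range(40))
--               for pat in patterns]
--     best = max(scores)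
--     return [k + 1 for k, s in enumerate(scores) if s == best]
-- ===== Notes on version B (the rewrite author's own statement) =====
-- stated objective: alternative
-- what changed: Replaces A's per-element comparison against the three cyclic patterns by a counting algorithm: one pass builds a histogram of (index mod 40, value) pairs (40 = lcm of the pattern periods), then each pattern's score is obtained by 40 histogram lookups instead of scanning the answers.
import Mathlib
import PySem

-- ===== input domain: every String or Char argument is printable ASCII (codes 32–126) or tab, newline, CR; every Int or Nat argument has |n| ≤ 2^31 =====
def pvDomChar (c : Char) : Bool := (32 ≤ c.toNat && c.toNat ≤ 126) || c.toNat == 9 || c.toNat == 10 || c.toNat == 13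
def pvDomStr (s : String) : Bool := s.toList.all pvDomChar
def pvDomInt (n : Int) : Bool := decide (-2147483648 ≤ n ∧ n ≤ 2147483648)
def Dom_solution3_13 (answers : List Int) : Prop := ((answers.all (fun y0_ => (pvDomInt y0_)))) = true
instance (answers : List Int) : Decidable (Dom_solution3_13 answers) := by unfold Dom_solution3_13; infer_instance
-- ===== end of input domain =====

-- B replaces A's per-element pattern comparison by a counting algorithm: one pass builds a
-- histogram of (index mod 40, value) pairs, then each pattern is scored by 40 histogram
-- lookups; objective: alternative algorithm, same complexity.

-- ===== PORT A =====
-- A's `for num, answer in enumerate(answers)` loop carrying the three counters p1,p2,p3.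
def pvLoopA (std1 std2 std3 : List Int) : Nat → Int → Int → Int → List Int → Int × Int × Int
  | _, p1, p2, p3, [] => (p1, p2, p3)
  | num, p1, p2, p3, a :: rest =>
    let p1 := if std1.getD (num % 5) 0 = a then p1 + 1 else p1
    let p2 := if std2.getD (num % 8) 0 = a then p2 + 1 else p2
    let p3 := if std3.getD (num % 10) 0 = a then p3 + 1 else p3
    pvLoopA std1 std2 std3 (num + 1) p1 p2 p3 rest

def solution3_13 (answers : List Int) : List Int :=
  let std1 : List Int := [1, 2, 3, 4, 5]
  let std2 : List Int := [2, 1, 2, 3, 2, 4, 2, 5]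
  let std3 : List Int := [3, 3, 1, 1, 2, 2, 4, 4, 5, 5]
  let p := pvLoopA std1 std2 std3 0 0 0 0 answers
  let answer : List Int := [p.1, p.2.1, p.2.2]
  let m := (PySem.List.max? answer (fun x => x)).getD 0  -- answer is nonempty, so max? is some
  (PySem.List.enumerate answer).filterMap (fun ip => if ip.2 = m then some (ip.1 + 1) else none)

-- ===== PORT B =====
-- Source B's histogram loop: `for i, a in enumerate(answers): key=(i%40,a); freq[key]=freq.get(key,0)+1`
def pvFreq (answers : List Int) : PySem.Dict (Int × Int) Int :=
  (PySem.List.enumerate answers).foldl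
    (fun d p =>
      d.insert (PySem.Int.mod p.1 40, p.2) (d.getD (PySem.Int.mod p.1 40, p.2) 0 + 1))
    PySem.Dict.empty

def solution3_13_alt (answers : List Int) : List Int :=
  let freq := pvFreq answers
  let patterns : List (List Int) :=
    [[1, 2, 3, 4, 5], [2, 1, 2, 3, 2, 4, 2, 5], [3, 3, 1, 1, 2, 2, 4, 4, 5, 5]]
  -- `sum(freq.get((r, pat[r % len(pat)]), 0) for r in range(40))` for each pattern
  let scores := patterns.map (fun pat =>
    (PySem.List.pyRange 0 40 1).foldl
      (fun s r => s + freq.getD (r, PySem.List.pyGetD pat (PySem.Int.mod r (pat.length : Int)) 0) 0) 0)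
  let best := (PySem.List.max? scores (fun x => x)).getD 0  -- scores is nonempty, so max? is some
  (PySem.List.enumerate scores).filterMap (fun ip => if ip.2 = best then some (ip.1 + 1) else none)

-- ===== PRECONDITION & SPEC =====
def Spec_solution3_13 (answers : List Int) (out : List Int) : Prop := out = solution3_13_alt answers
instance (answers : List Int) (out : List Int) : Decidable (Spec_solution3_13 answers out) := by unfold Spec_solution3_13; infer_instance

-- ===== CLAIM =====
def Claim_equal_solution3_13 : Prop := ∀ (answers : List Int), Dom_solution3_13 answers → Spec_solution3_13 answers (solution3_13 answers)

-- ===== LEMMAS AND PROOFS =====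

-- The common yardstick: number of positions i (counted from n) with pat[i % len(pat)] = a_i.
def pvScore (pat : List Int) : Nat → List Int → Int
  | _, [] => 0
  | i, a :: rest => (if pat.getD (i % pat.length) 0 = a then 1 else 0) + pvScore pat (i + 1) rest

-- A's interleaved loop computes the three per-pattern scores.
theorem pvLoopA_eq (xs : List Int) : ∀ (n : Nat) (p1 p2 p3 : Int),
    pvLoopA [1,2,3,4,5] [2,1,2,3,2,4,2,5] [3,3,1,1,2,2,4,4,5,5] n p1 p2 p3 xs =
      (p1 + pvScore [1,2,3,4,5] n xs,
       p2 + pvScore [2,1,2,3,2,4,2,5] n xs,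
       p3 + pvScore [3,3,1,1,2,2,4,4,5,5] n xs) := by
  induction xs with
  | nil => intro n p1 p2 p3; simp [pvLoopA, pvScore]
  | cons a rest ih =>
    intro n p1 p2 p3
    simp only [pvLoopA, pvScore, ih, List.length_cons]
    norm_num
    split_ifs <;> constructor <;> try constructor
    all_goals ring

-- The key list underlying B's histogram, starting at index n.
def pvKeys (n : Nat) (xs : List Int) : List (Int × Int) :=
  (PySem.List.enumerate xs (n : Int)).map (fun p => (PySem.Int.mod p.1 40, p.2))

theorem pvKeys_cons (n : Nat) (a : Int) (xs : List Int) :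
    pvKeys n (a :: xs) = ((n : Int) % 40, a) :: pvKeys (n + 1) xs := by
  simp [pvKeys, PySem.List.enumerate_cons]

-- B's histogram is the counter of the key list.
theorem pvFreq_getD (answers : List Int) (k : Int × Int) :
    (pvFreq answers).getD k 0 = ((pvKeys 0 answers).count k : Int) := by
  unfold pvFreq pvKeys
  have key : List.foldl
      (fun (d : PySem.Dict (Int × Int) Int) (p : Int × Int) =>
        d.insert (PySem.Int.mod p.1 40, p.2) (d.getD (PySem.Int.mod p.1 40, p.2) 0 + 1))
      PySem.Dict.empty (PySem.List.enumerate answers)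
      = List.foldl (fun (d : PySem.Dict (Int × Int) Int) k => d.insert k (d.getD k 0 + 1))
        PySem.Dict.empty
        ((PySem.List.enumerate answers).map (fun p => (PySem.Int.mod p.1 40, p.2))) := by
    rw [List.foldl_map]
  rw [show ((0:Nat):Int) = (0:Int) from rfl] at *
  rw [key, PySem.Dict.getD_foldl_insert_add_one]
  simp [PySem.Dict.getD_empty]

-- Indicator sums over a duplicate-free list.
theorem pv_sum_ind_zero (f : Int → Int) (j v : Int) : ∀ R : List Int, j ∉ R →
    (R.map (fun r => if (r, f r) = (j, v) then (1:Int) else 0)).sum = 0 := by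
  intro R
  induction R with
  | nil => intro _; simp
  | cons r R ih =>
    intro hj
    simp only [List.map_cons, List.sum_cons]
    rw [ih (fun h => hj (List.mem_cons_of_mem _ h))]
    have hr : r ≠ j := fun h => hj (h ▸ List.mem_cons_self)
    simp [Prod.ext_iff, hr]

theorem pv_sum_ind (f : Int → Int) (j v : Int) : ∀ R : List Int, R.Nodup → j ∈ R →
    (R.map (fun r => if (r, f r) = (j, v) then (1:Int) else 0)).sum = if f j = v then 1 else 0 := by
  intro R
  induction R with
  | nil => intro _ h; cases h
  | cons r R ih =>
    intro hnd hj
    simp only [List.map_cons, List.sum_cons]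
    rcases List.mem_cons.mp hj with rfl | hmem
    · rw [pv_sum_ind_zero f j v R (List.nodup_cons.mp hnd).1]
      simp [Prod.ext_iff]
    · have hr : r ≠ j := fun h => (List.nodup_cons.mp hnd).1 (h ▸ hmem)
      rw [ih (List.nodup_cons.mp hnd).2 hmem]
      simp [Prod.ext_iff, hr]

-- Adding one key to the list adds its match indicator to the 40-residue sum.
theorem sum_count_cons (j v : Int) (hj0 : 0 ≤ j) (hj40 : j < 40)
    (f : Int → Int) (l : List (Int × Int)) :
    ((PySem.List.pyRange 0 40 1).map (fun r => ((((j, v) :: l).count (r, f r)) : Int))).sum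
      = ((PySem.List.pyRange 0 40 1).map (fun r => ((l.count (r, f r)) : Int))).sum
        + (if f j = v then 1 else 0) := by
  have hcount : ∀ r : Int, (((j, v) :: l).count (r, f r) : Int)
      = (l.count (r, f r) : Int) + (if (r, f r) = (j, v) then 1 else 0) := by
    intro r
    rw [List.count_cons]
    split_ifs with h1 h2 h2 <;> simp_all
  calc ((PySem.List.pyRange 0 40 1).map (fun r => ((((j, v) :: l).count (r, f r)) : Int))).sum
      = ((PySem.List.pyRange 0 40 1).map (fun r =>
          (l.count (r, f r) : Int) + (if (r, f r) = (j, v) then 1 else 0))).sum := by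
        congr 1; apply List.map_congr_left; intro r _; exact hcount r
    _ = ((PySem.List.pyRange 0 40 1).map (fun r => ((l.count (r, f r)) : Int))).sum
        + ((PySem.List.pyRange 0 40 1).map (fun r => (if (r, f r) = (j, v) then (1:Int) else 0))).sum := by
        rw [PySem.List.sum_map_add_int]
    _ = _ := by
        congr 1
        exact pv_sum_ind f j v _ (by decide)
          (by rw [PySem.List.mem_pyRange_one]; exact ⟨hj0, hj40⟩)

-- The 40-residue histogram sum for a pattern whose period divides 40 is its score.
theorem sum_keys_eq_score (pat : List Int) (hL : (pat.length : Int) ∣ 40) (hpos : 0 < pat.length) :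
    ∀ (n : Nat) (xs : List Int),
    ((PySem.List.pyRange 0 40 1).map (fun r =>
        ((pvKeys n xs).count (r, PySem.List.pyGetD pat (PySem.Int.mod r (pat.length : Int)) 0) : Int))).sum
      = pvScore pat n xs := by
  intro n xs
  induction xs generalizing n with
  | nil =>
    simp [pvKeys, PySem.List.enumerate, pvScore]
  | cons a rest ih =>
    rw [pvKeys_cons]
    have hj0 : (0:Int) ≤ (n : Int) % 40 := Int.emod_nonneg _ (by norm_num)
    have hj40 : ((n : Int) % 40) < 40 := Int.emod_lt_of_pos _ (by norm_num)
    rw [sum_count_cons _ a hj0 hj40, ih]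
    have hmod : PySem.Int.mod ((n : Int) % 40) (pat.length : Int) = ((n % pat.length : Nat) : Int) := by
      rw [PySem.Int.mod_eq_emod_of_pos (by exact_mod_cast hpos : (0:Int) < (pat.length : Int))]
      rw [Int.emod_emod_of_dvd _ hL]
      omega
    have hget : PySem.List.pyGetD pat (PySem.Int.mod ((n : Int) % 40) (pat.length : Int)) 0
        = pat.getD (n % pat.length) 0 := by
      rw [hmod, PySem.List.pyGetD_natCast]
    rw [hget]
    simp only [pvScore]
    ring

-- Convert B's per-pattern foldl to the mapped sum.
theorem scoreB_eq (answers : List Int) (pat : List Int)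
    (hL : (pat.length : Int) ∣ 40) (hpos : 0 < pat.length) :
    (PySem.List.pyRange 0 40 1).foldl
      (fun s r => s + (pvFreq answers).getD (r, PySem.List.pyGetD pat (PySem.Int.mod r (pat.length : Int)) 0) 0) 0
      = pvScore pat 0 answers := by
  rw [PySem.List.foldl_add]
  rw [zero_add]
  have : ((PySem.List.pyRange 0 40 1).map (fun r =>
      (pvFreq answers).getD (r, PySem.List.pyGetD pat (PySem.Int.mod r (pat.length : Int)) 0) 0)).sum
      = ((PySem.List.pyRange 0 40 1).map (fun r =>
      ((pvKeys 0 answers).count (r, PySem.List.pyGetD pat (PySem.Int.mod r (pat.length : Int)) 0) : Int))).sum := by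
    congr 1; apply List.map_congr_left; intro r _; exact pvFreq_getD answers _
  rw [this, sum_keys_eq_score pat hL hpos]

-- ===== VERDICT =====
theorem solution3_13_spec : Claim_equal_solution3_13 := by
  intro answers _
  unfold Spec_solution3_13 solution3_13 solution3_13_alt
  have h1 := scoreB_eq answers [1,2,3,4,5] (by decide) (by decide)
  have h2 := scoreB_eq answers [2,1,2,3,2,4,2,5] (by decide) (by decide)
  have h3 := scoreB_eq answers [3,3,1,1,2,2,4,4,5,5] (by decide) (by decide)
  simp only [List.map, h1, h2, h3, pvLoopA_eq, zero_add]
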